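-- pv_equiv track=rewrite | github.com/CelsiaSolaraStarflare/ArcanaExtreme | arcana/mixup.py | split_content_and_notes
-- ===== SOURCE A (Python) =====
-- def split_content_and_notes(raw_content: str, title: str) -> tuple[list[str], list[str]]:
--     """
--     Splits raw slide content into main content lines and speaker notes.
--     Lines after 'Speaker Notes:' or 'Notes:' are treated as notes.
--     """
--     content_lines = []
--     notes_lines = []
--     notes_section = False
--     for line in raw_content.splitlines():
--         stripped = line.strip()
--         if stripped.lower().startswith('speaker notes:') or stripped.lower().startswith('notes:'):
--             notes_section = True
--             continue
--         if notes_section: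
--             notes_lines.append(line)
--         else:
--             content_lines.append(line)
--     return content_lines, notes_lines
-- ===== SOURCE B (Python) =====
-- def split_content_and_notes(raw_content: str, title: str) -> tuple[list[str], list[str]]:
--     """Backward scan: walk the lines from the end; a marker line flushes the
--     segment accumulated so far (i.e. everything below it) into the notes."""
--     def is_marker(l):
--         s = l.strip().lower()
--         return s.startswith('speaker notes:') or s.startswith('notes:')
--
--     seg = []     # lines below the last marker seen so far, in reverse order
--     notes = []
--     for line in reversed(raw_content.splitlines()):
--         if is_marker(line):
--             notes = list(reversed(seg)) + notes
--             seg = []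
--         else:
--             seg.append(line)
--     seg.reverse()
--     return seg, notes
-- ===== Notes on version B (the rewrite author's own statement) =====
-- stated objective: alternative
-- what changed: Replaces A's forward loop with a notes_section flag by a backward scan with no flag: walking the lines from the end, each marker line flushes the segment accumulated below it into the notes, so the segment left at the end is the content.
import Mathlib
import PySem

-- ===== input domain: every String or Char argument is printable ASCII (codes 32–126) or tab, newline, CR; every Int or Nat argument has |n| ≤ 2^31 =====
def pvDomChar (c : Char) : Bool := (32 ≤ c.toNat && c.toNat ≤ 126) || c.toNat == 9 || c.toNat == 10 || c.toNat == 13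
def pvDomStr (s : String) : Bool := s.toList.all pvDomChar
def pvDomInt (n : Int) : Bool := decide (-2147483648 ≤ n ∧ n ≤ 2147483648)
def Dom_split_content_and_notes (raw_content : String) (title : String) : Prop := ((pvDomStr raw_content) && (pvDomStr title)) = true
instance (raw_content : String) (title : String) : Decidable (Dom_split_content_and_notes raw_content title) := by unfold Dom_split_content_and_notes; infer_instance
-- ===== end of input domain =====

-- B scans the lines backwards with no flag: each marker line flushes the segment below it into the notes (objective: alternative).

-- ===== PORT A =====
-- A's loop: state (content_lines, notes_lines, notes_section), one line at a time.
def pvSplitLoopA : List String → List String → List String → Bool → List String × List String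
  | [], c, n, _ => (c, n)
  | line :: rest, c, n, flag =>
    let stripped := PySem.Str.strip line
    if PySem.Str.startswith (PySem.Str.lower stripped) "speaker notes:"
        || PySem.Str.startswith (PySem.Str.lower stripped) "notes:" then
      pvSplitLoopA rest c n true
    else if flag then
      pvSplitLoopA rest c (n ++ [line]) flag
    else
      pvSplitLoopA rest (c ++ [line]) n flag

def split_content_and_notes (raw_content : String) (title : String) : List String × List String :=
  pvSplitLoopA (PySem.Str.splitlines raw_content) [] [] false

-- ===== PORT B =====
def pvIsMarker (l : String) : Bool :=
  let s := PySem.Str.lower (PySem.Str.strip l)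
  PySem.Str.startswith s "speaker notes:" || PySem.Str.startswith s "notes:"

-- one step of B's backward loop: state (seg, notes)
def pvStepB (s : List String × List String) (line : String) : List String × List String :=
  if pvIsMarker line then ([], s.1.reverse ++ s.2) else (s.1 ++ [line], s.2)

def split_content_and_notes_alt (raw_content : String) (title : String) : List String × List String :=
  let s := (PySem.Str.splitlines raw_content).reverse.foldl pvStepB ([], [])
  (s.1.reverse, s.2)

-- ===== PRECONDITION & SPEC =====
def Spec_split_content_and_notes (raw_content : String) (title : String) (out : List String × List String) : Prop := out = split_content_and_notes_alt raw_content title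
instance (raw_content : String) (title : String) (out : List String × List String) : Decidable (Spec_split_content_and_notes raw_content title out) := by unfold Spec_split_content_and_notes; infer_instance

-- ===== CLAIM =====
def Claim_equal_split_content_and_notes : Prop := ∀ (raw_content : String) (title : String), Dom_split_content_and_notes raw_content title → Spec_split_content_and_notes raw_content title (split_content_and_notes raw_content title)

-- ===== LEMMAS AND PROOFS =====

-- the right-fold step B's backward loop implements on the original line order
def pvStep1 (l : String) (p : List String × List String) : List String × List String :=
  if pvIsMarker l then ([], p.1 ++ p.2) else (l :: p.1, p.2)

def pvF : List String → (List String × List String) → List String × List String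
  | [], p => p
  | l :: ls, p => pvStep1 l (pvF ls p)

theorem pvF_append (as bs : List String) (p : List String × List String) :
    pvF (as ++ bs) p = pvF as (pvF bs p) := by
  induction as with
  | nil => rfl
  | cons a as ih => simp [pvF, ih]

-- B's foldl over the reversed lines computes the right fold pvF on the original order.
theorem pvFoldB (ys : List String) : ∀ (s : List String × List String),
    (((ys.foldl pvStepB s).1.reverse, (ys.foldl pvStepB s).2) : List String × List String)
      = pvF ys.reverse (s.1.reverse, s.2) := by
  induction ys with
  | nil => intro s; rfl
  | cons y ys ih =>
    intro s
    have h : ((pvStepB s y).1.reverse, (pvStepB s y).2) = pvStep1 y (s.1.reverse, s.2) := by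
      by_cases hy : pvIsMarker y = true <;> simp [pvStepB, pvStep1, hy]
    simp only [List.foldl_cons, List.reverse_cons, pvF_append, ih (pvStepB s y), h]
    rfl

-- the non-marker lines of ls are exactly pvF's content followed by its notes
theorem pvF_filter (ls : List String) :
    (pvF ls ([], [])).1 ++ (pvF ls ([], [])).2 = ls.filter (fun l => !pvIsMarker l) := by
  induction ls with
  | nil => rfl
  | cons l rest ih =>
    by_cases h : pvIsMarker l = true <;>
      simp [pvF, pvStep1, h, List.filter_cons, ih]

-- Once the flag is set, A just appends the non-marker lines to notes.
theorem pvSplitLoopA_true (lines : List String) : ∀ (c n : List String),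
    pvSplitLoopA lines c n true = (c, n ++ lines.filter (fun l => !pvIsMarker l)) := by
  induction lines with
  | nil => intro c n; simp [pvSplitLoopA]
  | cons line rest ih =>
    intro c n
    have hc : (PySem.Str.startswith (PySem.Str.lower (PySem.Str.strip line)) "speaker notes:"
        || PySem.Str.startswith (PySem.Str.lower (PySem.Str.strip line)) "notes:") = pvIsMarker line := rfl
    by_cases h : pvIsMarker line = true
    · simp only [pvSplitLoopA, hc, h, if_true, ih, List.filter_cons, Bool.not_true]
      simp
    · simp only [pvSplitLoopA, hc, Bool.not_eq_true] at *
      simp only [h, Bool.false_eq_true, if_false, ih, List.filter_cons, h, Bool.not_false, if_true]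
      simp

-- Before the flag is set, A computes the right fold pvF (seeded by its accumulators).
theorem pvSplitLoopA_false (lines : List String) : ∀ (c n : List String),
    pvSplitLoopA lines c n false = (c ++ (pvF lines ([], [])).1, n ++ (pvF lines ([], [])).2) := by
  induction lines with
  | nil => intro c n; simp [pvSplitLoopA, pvF]
  | cons line rest ih =>
    intro c n
    have hc : (PySem.Str.startswith (PySem.Str.lower (PySem.Str.strip line)) "speaker notes:"
        || PySem.Str.startswith (PySem.Str.lower (PySem.Str.strip line)) "notes:") = pvIsMarker line := rfl
    by_cases h : pvIsMarker line = true
    · simp only [pvSplitLoopA, hc, h, if_true, pvSplitLoopA_true, pvF, pvStep1,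
        ← pvF_filter rest]
      simp [h]
    · simp only [pvSplitLoopA, hc, Bool.not_eq_true] at *
      simp only [h, Bool.false_eq_true, if_false, ih, pvF, pvStep1, h, Bool.not_false, if_true]
      simp [h]

-- ===== VERDICT =====
theorem split_content_and_notes_spec : Claim_equal_split_content_and_notes := by
  intro raw_content title _
  unfold Spec_split_content_and_notes split_content_and_notes split_content_and_notes_alt
  rw [pvSplitLoopA_false]
  rw [show ((PySem.Str.splitlines raw_content).reverse.foldl pvStepB ([], []) :
      List String × List String)
      = ((((PySem.Str.splitlines raw_content).reverse.foldl pvStepB ([], [])).1,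
          ((PySem.Str.splitlines raw_content).reverse.foldl pvStepB ([], [])).2)) from rfl]
  simp only []
  have := pvFoldB (PySem.Str.splitlines raw_content).reverse (([], []) : List String × List String)
  simp only [List.reverse_reverse, List.reverse_nil] at this
  rw [Prod.ext_iff] at this ⊢
  constructor
  · simpa using this.1.symm
  · simpa using this.2.symm
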